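-- pv_equiv track=rewrite | github.com/torenapart/CP164 | quar7316_a01/src/functions.py | dsmvwl
-- ===== SOURCE A (Python) =====
-- def dsmvwl(string):
--     """
--     -------------------------------------------------------
--     Disemvowels a string. out contains all the characters in s
--     that are not vowels. ('y' is not considered a vowel.) Case is preserved.
--     Use: out = dsmvwl(string)
--     -------------------------------------------------------
--     Parameters:
--        string - a string (str)
--     Returns:
--        out - string with the vowels removed (str)
--     -------------------------------------------------------
--     """
--     v1 = "a"
--     v2 = "e"
--     v3 = "i"
--     v4 = "o"
--     v5 = "u"
--     out = ""
--
--     for char in string: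
--         if char.lower() not in [v1, v2, v3, v4, v5]:
--             out += char
--
--     return out
-- ===== SOURCE B (Python) =====
-- def dsmvwl(string):
--     # Staged passes: strip each vowel in turn with str.replace, ten whole-string
--     # passes instead of one per-character membership-test loop.
--     for v in "aeiouAEIOU":
--         string = string.replace(v, "")
--     return string
-- ===== Notes on version B (the rewrite author's own statement) =====
-- stated objective: alternative
-- what changed: Replaces A's single per-character loop with a lowercase-then-list-membership test by ten staged whole-string passes, one str.replace per vowel of both cases, with no per-character membership test or explicit Python-level loop over characters.
import Mathlib
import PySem

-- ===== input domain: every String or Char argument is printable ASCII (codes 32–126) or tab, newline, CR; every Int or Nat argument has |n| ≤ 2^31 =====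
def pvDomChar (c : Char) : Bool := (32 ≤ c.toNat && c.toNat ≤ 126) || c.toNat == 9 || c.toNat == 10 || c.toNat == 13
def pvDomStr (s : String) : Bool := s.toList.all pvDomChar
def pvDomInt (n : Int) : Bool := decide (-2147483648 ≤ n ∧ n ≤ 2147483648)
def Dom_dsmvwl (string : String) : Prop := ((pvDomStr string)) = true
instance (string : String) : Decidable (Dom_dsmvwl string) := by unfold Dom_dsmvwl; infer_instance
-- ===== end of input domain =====

-- B replaces A's single per-character loop (lowercase + list-membership test) by ten
-- staged whole-string str.replace passes, one per vowel of either case (alternative).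


-- ===== PORT A =====
def dsmvwl (string : String) : String :=
  let v1 : Char := 'a'
  let v2 : Char := 'e'
  let v3 : Char := 'i'
  let v4 : Char := 'o'
  let v5 : Char := 'u'
  let out : List Char := []
  let out := string.toList.foldl (fun out char =>
    if !([v1, v2, v3, v4, v5].contains (PySem.Chars.lowerChar char)) then out ++ [char] else out) out
  String.mk out

-- ===== PORT B =====
-- for v in "aeiouAEIOU": string = string.replace(v, "")
def dsmvwl_alt (string : String) : String :=
  "aeiouAEIOU".toList.foldl (fun s v => PySem.Str.replace s (String.mk [v]) "") string

-- ===== PRECONDITION & SPEC =====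
def Spec_dsmvwl (string : String) (out : String) : Prop := out = dsmvwl_alt string
instance (string : String) (out : String) : Decidable (Spec_dsmvwl string out) := by unfold Spec_dsmvwl; infer_instance

-- ===== CLAIM (what is proved, stated in full; the proofs are below) =====
def Claim_equal_dsmvwl : Prop := ∀ (string : String), Dom_dsmvwl string → Spec_dsmvwl string (dsmvwl string)

-- ===== LEMMAS AND PROOFS =====
-- replace.go with a single-char pattern and empty replacement is a filter (fuel ≥ length)
theorem pv_replace_go (v : Char) : ∀ (fuel : Nat) (l acc : List Char), l.length ≤ fuel →
    PySem.Chars.replace.go [v] [] fuel l acc = acc.reverse ++ l.filter (fun c => c != v) := by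
  intro fuel
  induction fuel with
  | zero =>
    intro l acc h
    have : l = [] := List.eq_nil_of_length_eq_zero (Nat.le_zero.mp h)
    subst this
    simp [PySem.Chars.replace.go]
  | succ n ih =>
    intro l acc h
    cases l with
    | nil => simp [PySem.Chars.replace.go]
    | cons c t =>
      simp only [PySem.Chars.replace.go]
      by_cases hv : c = v
      · subst hv
        rw [if_pos (by simp [List.isPrefixOf])]
        rw [ih _ _ (by simpa using Nat.succ_le_succ_iff.mp h)]
        simp
      · rw [if_neg (by simp [List.isPrefixOf]; exact fun hh => hv hh.symm)]
        rw [ih _ _ (by simpa using Nat.succ_le_succ_iff.mp h)]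
        simp [hv]

-- s.replace(v, '') for a single character v removes exactly the occurrences of v
theorem pv_replace_filter (l : List Char) (v : Char) :
    PySem.Chars.replace l [v] [] = l.filter (fun c => c != v) := by
  rw [PySem.Chars.replace]
  rw [if_neg (by simp)]
  simpa using pv_replace_go v l.length l [] le_rfl

-- the staged passes compose into one filter against the whole vowel list
theorem pv_stage_foldl : ∀ (vs l : List Char),
    vs.foldl (fun s v => s.filter (fun c => c != v)) l = l.filter (fun c => !(vs.contains c)) := by
  intro vs
  induction vs with
  | nil => intro l; simp
  | cons v vs ih =>
    intro l
    simp only [List.foldl_cons, ih, List.filter_filter]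
    apply List.filter_congr
    intro c _
    by_cases h : c = v <;> simp [h]

-- string-level foldl of Str.replace reflects to the list-level foldl of filters
theorem pv_alt_toList (vs : List Char) : ∀ (s : String),
    (vs.foldl (fun s v => PySem.Str.replace s (String.mk [v]) "") s).toList =
    vs.foldl (fun l v => l.filter (fun c => c != v)) s.toList := by
  induction vs with
  | nil => intro s; simp
  | cons v vs ih =>
    intro s
    simp only [List.foldl_cons, ih, PySem.Str.toList_replace]
    have hmk : (String.mk [v]).toList = [v] := Eq.symm (String.ofList_eq.mp rfl)
    have hnil : ("" : String).toList = [] := by decide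
    rw [hmk, hnil, pv_replace_filter]

-- a character's lowercase form is an ASCII vowel exactly when it occurs in "aeiouAEIOU"
theorem pv_key_dsmvwl (c : Char) :
    (!(['a','e','i','o','u'].contains (PySem.Chars.lowerChar c))) =
    (!(("aeiouAEIOU".toList).contains c)) := by
  have hlist : "aeiouAEIOU".toList = ['a','e','i','o','u','A','E','I','O','U'] := by decide
  rw [hlist, Bool.eq_iff_iff]
  unfold PySem.Chars.lowerChar PySem.Chars.isupper
  by_cases h : ('A' ≤ c ∧ c ≤ 'Z')
  · have hA : 65 ≤ c.toNat := h.1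
    have hZ : c.toNat ≤ 90 := h.2
    have hval : Nat.isValidChar (c.toNat + 32) := Or.inl (by omega)
    have hv : (Char.ofNat (c.toNat + 32)).toNat = c.toNat + 32 := by
      simp [Char.ofNat, hval]
    simp only [h.1, h.2, decide_true, Bool.and_self, if_pos]
    simp [Char.ext_iff, ← UInt32.toNat_inj, Char.toNat_val, hv]
    omega
  · rw [if_neg (by
      simp only [Bool.and_eq_true, decide_eq_true_eq, not_and]
      intro hh hh2; exact h ⟨hh, hh2⟩)]
    have hc : ¬(65 ≤ c.toNat ∧ c.toNat ≤ 90) := fun hcc => h ⟨hcc.1, hcc.2⟩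
    simp [Char.ext_iff, ← UInt32.toNat_inj, Char.toNat_val]
    omega

-- ===== VERDICT (by name: the statement is the Claim_ definition above) =====
theorem dsmvwl_spec : Claim_equal_dsmvwl := by
  intro string _
  unfold Spec_dsmvwl dsmvwl dsmvwl_alt
  simp only []
  rw [PySem.List.foldl_append_if_eq_filter, List.nil_append]
  apply String.toList_injective
  rw [pv_alt_toList, pv_stage_foldl]
  have hmk : ∀ l : List Char, (String.mk l).toList = l := fun l => Eq.symm (String.ofList_eq.mp rfl)
  rw [hmk]
  exact List.filter_congr (fun c _ => pv_key_dsmvwl c)
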